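-- pv_equiv track=rewrite | github.com/emanna1/automator | job_automator_v2.py | get_tone_for_company
-- ===== SOURCE A (Python) =====
-- def get_tone_for_company(company: str, title: str) -> str:
--     c = company.lower()
--     t = title.lower()
--
--     if any(x in c for x in ["rothschild", "lazard", "perella", "evercore", "centerview"]):
--         return (
--             "TONE: Elite boutique. Formal, precise, understated. Let credentials speak — "
--             "no enthusiasm-signalling, no exclamation marks. Every word must earn its place. "
--             "Lead with intellectual substance, not eagerness."
--         )
--     elif any(x in c for x in ["eurazeo", "tikehau", "ardian", "kkr", "carlyle", "blackstone", "apollo"]):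
--         return (
--             "TONE: Private equity. Sharp and investor-minded. Lead with quantitative instincts. "
--             "Show you think about returns, not just process. Reference modelling and analytical rigour prominently."
--         )
--     elif any(x in c for x in ["deloitte", "kpmg", "pwc", "ey", "bearingpoint", "mckinsey", "bcg", "bain"]):
--         return (
--             "TONE: Consulting / Big 4. Professional but warm. Emphasise team collaboration, "
--             "client communication, and cross-functional work. Analytical rigour paired with "
--             "clear communication is the key message."
--         )
--     elif any(x in c for x in ["bnp", "societe", "société", "credit agricole", "crédit agricole",
--                                 "natixis", "cacib", "sg ", "soc gen"]):
--         return (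
--             "TONE: French bank. Collegial and professional. Emphasise the French-language advantage "
--             "and understanding of French banking culture. Cross-border coordination is a strong card."
--         )
--     elif any(x in c for x in ["jp morgan", "goldman", "morgan stanley", "bank of america", "citi", "barclays"]):
--         return (
--             "TONE: Bulge bracket. Confident and high-energy. Show intellectual curiosity and "
--             "drive. These firms want ambition paired with analytical foundation."
--         )
--     else:
--         return (
--             "TONE: Direct and confident. Match the energy of the JD. "
--             "If the JD is formal, be formal. If conversational, be slightly warmer. "
--             "Always lead with something specific to this company and role."
--         )
-- ===== SOURCE B (Python) =====
-- _TONES = [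
--     "TONE: Elite boutique. Formal, precise, understated. Let credentials speak — "
--     "no enthusiasm-signalling, no exclamation marks. Every word must earn its place. "
--     "Lead with intellectual substance, not eagerness.",
--     "TONE: Private equity. Sharp and investor-minded. Lead with quantitative instincts. "
--     "Show you think about returns, not just process. Reference modelling and analytical rigour prominently.",
--     "TONE: Consulting / Big 4. Professional but warm. Emphasise team collaboration, "
--     "client communication, and cross-functional work. Analytical rigour paired with "
--     "clear communication is the key message.",
--     "TONE: French bank. Collegial and professional. Emphasise the French-language advantage "
--     "and understanding of French banking culture. Cross-border coordination is a strong card.",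
--     "TONE: Bulge bracket. Confident and high-energy. Show intellectual curiosity and "
--     "drive. These firms want ambition paired with analytical foundation.",
--     "TONE: Direct and confident. Match the energy of the JD. "
--     "If the JD is formal, be formal. If conversational, be slightly warmer. "
--     "Always lead with something specific to this company and role.",
-- ]
--
-- # Flat keyword -> tone index map; the highest-priority rule wins as the MINIMUM
-- # index among all matching keywords (index 5 = default tone).
-- _KEY2TONE = {
--     "rothschild": 0, "lazard": 0, "perella": 0, "evercore": 0, "centerview": 0,
--     "eurazeo": 1, "tikehau": 1, "ardian": 1, "kkr": 1, "carlyle": 1,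
--     "blackstone": 1, "apollo": 1,
--     "deloitte": 2, "kpmg": 2, "pwc": 2, "ey": 2, "bearingpoint": 2,
--     "mckinsey": 2, "bcg": 2, "bain": 2,
--     "bnp": 3, "societe": 3, "société": 3, "credit agricole": 3,
--     "crédit agricole": 3, "natixis": 3, "cacib": 3, "sg ": 3, "soc gen": 3,
--     "jp morgan": 4, "goldman": 4, "morgan stanley": 4, "bank of america": 4,
--     "citi": 4, "barclays": 4,
-- }
--
--
-- def get_tone_for_company(company: str, title: str) -> str:
--     c = company.lower()
--     return _TONES[min((i for kw, i in _KEY2TONE.items() if kw in c), default=5)]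
-- ===== Notes on version B (the rewrite author's own statement) =====
-- stated objective: idiomatic
-- what changed: A's prioritised if-elif chain with early returns is replaced by a flat keyword-to-rule-index dict: B collects every matching keyword, takes the minimum rule index (default 5), and indexes a tone table; the unused title.lower() dead code is dropped.
import Mathlib
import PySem

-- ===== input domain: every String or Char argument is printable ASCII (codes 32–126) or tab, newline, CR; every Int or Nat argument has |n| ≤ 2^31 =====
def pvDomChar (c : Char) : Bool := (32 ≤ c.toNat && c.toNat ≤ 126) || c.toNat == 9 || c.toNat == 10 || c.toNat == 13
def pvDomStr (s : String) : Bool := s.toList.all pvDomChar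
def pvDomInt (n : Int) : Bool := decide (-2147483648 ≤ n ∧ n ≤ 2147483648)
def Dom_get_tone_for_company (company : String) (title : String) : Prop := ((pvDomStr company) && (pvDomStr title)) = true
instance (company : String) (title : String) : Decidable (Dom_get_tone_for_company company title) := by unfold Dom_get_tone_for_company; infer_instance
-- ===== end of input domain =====

-- B replaces A's prioritised if-elif chain (early return at the first matching group) by a flat
-- keyword→index map: it collects ALL matching keywords and takes the MINIMUM rule index, then
-- indexes a tone table (objective: idiomatic). A's 't = title.lower()' is dead code; B drops it.

-- ===== PORT A =====
def get_tone_for_company (company : String) (title : String) : String :=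
  let c := PySem.Str.lower company
  let _t := PySem.Str.lower title
  if (["rothschild", "lazard", "perella", "evercore", "centerview"].any
      (fun x => PySem.Str.isIn x c)) then
    "TONE: Elite boutique. Formal, precise, understated. Let credentials speak — no enthusiasm-signalling, no exclamation marks. Every word must earn its place. Lead with intellectual substance, not eagerness."
  else if (["eurazeo", "tikehau", "ardian", "kkr", "carlyle", "blackstone", "apollo"].any
      (fun x => PySem.Str.isIn x c)) then
    "TONE: Private equity. Sharp and investor-minded. Lead with quantitative instincts. Show you think about returns, not just process. Reference modelling and analytical rigour prominently."
  else if (["deloitte", "kpmg", "pwc", "ey", "bearingpoint", "mckinsey", "bcg", "bain"].any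
      (fun x => PySem.Str.isIn x c)) then
    "TONE: Consulting / Big 4. Professional but warm. Emphasise team collaboration, client communication, and cross-functional work. Analytical rigour paired with clear communication is the key message."
  else if (["bnp", "societe", "société", "credit agricole", "crédit agricole",
            "natixis", "cacib", "sg ", "soc gen"].any
      (fun x => PySem.Str.isIn x c)) then
    "TONE: French bank. Collegial and professional. Emphasise the French-language advantage and understanding of French banking culture. Cross-border coordination is a strong card."
  else if (["jp morgan", "goldman", "morgan stanley", "bank of america", "citi", "barclays"].any
      (fun x => PySem.Str.isIn x c)) then
    "TONE: Bulge bracket. Confident and high-energy. Show intellectual curiosity and drive. These firms want ambition paired with analytical foundation."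
  else
    "TONE: Direct and confident. Match the energy of the JD. If the JD is formal, be formal. If conversational, be slightly warmer. Always lead with something specific to this company and role."

-- ===== PORT B =====
def pvTones : List String :=
  [ "TONE: Elite boutique. Formal, precise, understated. Let credentials speak — no enthusiasm-signalling, no exclamation marks. Every word must earn its place. Lead with intellectual substance, not eagerness.",
    "TONE: Private equity. Sharp and investor-minded. Lead with quantitative instincts. Show you think about returns, not just process. Reference modelling and analytical rigour prominently.",
    "TONE: Consulting / Big 4. Professional but warm. Emphasise team collaboration, client communication, and cross-functional work. Analytical rigour paired with clear communication is the key message.",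
    "TONE: French bank. Collegial and professional. Emphasise the French-language advantage and understanding of French banking culture. Cross-border coordination is a strong card.",
    "TONE: Bulge bracket. Confident and high-energy. Show intellectual curiosity and drive. These firms want ambition paired with analytical foundation.",
    "TONE: Direct and confident. Match the energy of the JD. If the JD is formal, be formal. If conversational, be slightly warmer. Always lead with something specific to this company and role." ]

-- flat keyword → tone-index map (the dict _KEY2TONE of Source B, in insertion order)
def pvKey2Tone : List (String × Nat) :=
  [ ("rothschild", 0), ("lazard", 0), ("perella", 0), ("evercore", 0), ("centerview", 0),
    ("eurazeo", 1), ("tikehau", 1), ("ardian", 1), ("kkr", 1), ("carlyle", 1),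
    ("blackstone", 1), ("apollo", 1),
    ("deloitte", 2), ("kpmg", 2), ("pwc", 2), ("ey", 2), ("bearingpoint", 2),
    ("mckinsey", 2), ("bcg", 2), ("bain", 2),
    ("bnp", 3), ("societe", 3), ("société", 3), ("credit agricole", 3),
    ("crédit agricole", 3), ("natixis", 3), ("cacib", 3), ("sg ", 3), ("soc gen", 3),
    ("jp morgan", 4), ("goldman", 4), ("morgan stanley", 4), ("bank of america", 4),
    ("citi", 4), ("barclays", 4) ]

-- min over the filtered iteration, with default 5, as the obvious fold
def get_tone_for_company_alt (company : String) (title : String) : String :=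
  let c := PySem.Str.lower company
  let idx := pvKey2Tone.foldl (fun acc p => if PySem.Str.isIn p.1 c then min acc p.2 else acc) 5
  pvTones.getD idx ""

-- ===== PRECONDITION & SPEC =====
def Spec_get_tone_for_company (company : String) (title : String) (out : String) : Prop := out = get_tone_for_company_alt company title
instance (company : String) (title : String) (out : String) : Decidable (Spec_get_tone_for_company company title out) := by unfold Spec_get_tone_for_company; infer_instance

-- ===== CLAIM (what is proved, stated in full; the proofs are below) =====
def Claim_equal_get_tone_for_company : Prop := ∀ (company : String) (title : String), Dom_get_tone_for_company company title → Spec_get_tone_for_company company title (get_tone_for_company company title)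

-- ===== LEMMAS AND PROOFS =====

-- folding min over a group of keywords that all map to the same index g
theorem pv_fold_group (c : String) (g : Nat) (kws : List String) (acc : Nat) :
    (kws.map (fun k => (k, g))).foldl
      (fun acc p => if PySem.Str.isIn p.1 c then min acc p.2 else acc) acc
    = if kws.any (fun k => PySem.Str.isIn k c) then min acc g else acc := by
  induction kws generalizing acc with
  | nil => simp
  | cons k ks ih =>
    simp only [List.map_cons, List.foldl_cons, List.any_cons, ih]
    by_cases h : PySem.Str.isIn k c = true <;>
      by_cases h' : (ks.any fun k => PySem.Str.isIn k c) = true <;>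
        simp only [Bool.or_eq_true, h, h', true_or, or_true, Bool.false_eq_true, false_or,
          if_true, if_false] <;> omega

theorem pvKey2Tone_groups :
    pvKey2Tone =
      (["rothschild", "lazard", "perella", "evercore", "centerview"].map (fun k => (k, 0)))
      ++ (["eurazeo", "tikehau", "ardian", "kkr", "carlyle", "blackstone", "apollo"].map (fun k => (k, 1)))
      ++ (["deloitte", "kpmg", "pwc", "ey", "bearingpoint", "mckinsey", "bcg", "bain"].map (fun k => (k, 2)))
      ++ (["bnp", "societe", "société", "credit agricole", "crédit agricole",
           "natixis", "cacib", "sg ", "soc gen"].map (fun k => (k, 3)))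
      ++ (["jp morgan", "goldman", "morgan stanley", "bank of america", "citi", "barclays"].map (fun k => (k, 4))) := rfl

-- ===== VERDICT (by name: the statement is the Claim_ definition above) =====
theorem get_tone_for_company_spec : Claim_equal_get_tone_for_company := by
  intro company title _
  unfold Spec_get_tone_for_company get_tone_for_company get_tone_for_company_alt
  rw [pvKey2Tone_groups]
  simp only [List.foldl_append, pv_fold_group]
  by_cases h1 : (["rothschild", "lazard", "perella", "evercore", "centerview"].any
      (fun x => PySem.Str.isIn x (PySem.Str.lower company))) = true <;>
  by_cases h2 : (["eurazeo", "tikehau", "ardian", "kkr", "carlyle", "blackstone", "apollo"].any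
      (fun x => PySem.Str.isIn x (PySem.Str.lower company))) = true <;>
  by_cases h3 : (["deloitte", "kpmg", "pwc", "ey", "bearingpoint", "mckinsey", "bcg", "bain"].any
      (fun x => PySem.Str.isIn x (PySem.Str.lower company))) = true <;>
  by_cases h4 : (["bnp", "societe", "société", "credit agricole", "crédit agricole",
            "natixis", "cacib", "sg ", "soc gen"].any
      (fun x => PySem.Str.isIn x (PySem.Str.lower company))) = true <;>
  by_cases h5 : (["jp morgan", "goldman", "morgan stanley", "bank of america", "citi", "barclays"].any
      (fun x => PySem.Str.isIn x (PySem.Str.lower company))) = true <;>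
  simp only [h1, h2, h3, h4, h5, if_true, if_false] <;> rfl
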